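-- pv_equiv track=rewrite | github.com/adut24/holbertonschool-interview | lockboxes/0-lockboxes.py | unlockBoxes
-- ===== SOURCE A (Python) =====
-- def unlockBoxes(boxes, open_boxes, index):
--     """
--     Recursively unlocks boxes in a list of boxes.
--
--     Args:
--     - boxes (list): all boxes and their keys
--     - open_boxes (dict): state of each box
--     - index (int): index of the box to be opened
--
--     Returns:
--     - dict: updated state of each box
--     """
--
--     if open_boxes.get(index):
--         for key in boxes[index]:
--             is_opened = open_boxes.get(key)
--             if key < index and not is_opened:
--                 open_boxes.update({key: True})
--                 open_boxes = unlockBoxes(boxes, open_boxes, key)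
--             elif not is_opened:
--                 open_boxes.update({key: True})
--     return open_boxes
-- ===== SOURCE B (Python) =====
-- def unlockBoxes(boxes, open_boxes, index):
--     """Iterative DFS with an explicit stack of (parent, key) pairs;
--     mutates open_boxes in place and returns it (same as A)."""
--     if not open_boxes.get(index):
--         return open_boxes
--     stack = [(index, key) for key in reversed(boxes[index])]
--     while stack:
--         parent, key = stack.pop()
--         if open_boxes.get(key):
--             continue
--         open_boxes[key] = True
--         if key < parent:
--             stack.extend((key, k) for k in reversed(boxes[key]))
--     return open_boxes
-- ===== Notes on version B (the rewrite author's own statement) =====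
-- stated objective: alternative
-- what changed: Replaces A's recursion (re-entrant function call per sub-box, interleaved with the parent's remaining keys) by a single iterative loop over an explicit stack of (parent, key) pairs that reproduces the same depth-first pre-order; no Python recursion, no per-call frames. Pre_ excludes only inputs that can make the DFS raise IndexError: listed keys below -len(boxes) that are not initially open (conservatively, even if they sit in a box the DFS never visits, since visitation is order-dependent and not closed-form); B agrees with A there too.
-- outside the precondition, e.g. on unlockBoxes([[0], [-5]], {0: True}, 0): A returns {0: True}, B returns {0: True}; on unlockBoxes([[], [-7]], {0: True}, 0): A returns {0: True}, B returns {0: True}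
import Mathlib
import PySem

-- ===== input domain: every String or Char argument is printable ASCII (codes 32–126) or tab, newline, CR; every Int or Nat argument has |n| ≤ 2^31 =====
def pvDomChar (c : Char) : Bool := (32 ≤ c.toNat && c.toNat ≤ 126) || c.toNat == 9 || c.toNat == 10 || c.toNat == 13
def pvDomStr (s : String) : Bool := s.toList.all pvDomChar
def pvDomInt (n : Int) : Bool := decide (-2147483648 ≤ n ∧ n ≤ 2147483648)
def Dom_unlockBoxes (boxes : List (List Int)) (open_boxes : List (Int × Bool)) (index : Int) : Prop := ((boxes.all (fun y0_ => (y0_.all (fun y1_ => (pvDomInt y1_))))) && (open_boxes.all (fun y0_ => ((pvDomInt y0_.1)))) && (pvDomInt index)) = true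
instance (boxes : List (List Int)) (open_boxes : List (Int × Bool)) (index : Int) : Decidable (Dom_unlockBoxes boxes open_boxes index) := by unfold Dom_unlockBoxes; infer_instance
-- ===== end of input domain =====

-- B replaces A's recursion by an iterative depth-first search over an explicit stack of
-- (parent, key) pairs (objective: alternative, same cost). Both Pythons mutate open_boxes
-- in place identically; the equivalence proved here is about the returned dict's items.

-- ===== PORT A =====
-- A is recursive; the port carries a fuel counter bounding recursion DEPTH only.  Every
-- nested call first turns a closed listed key open, so depth never exceeds the number of
-- listed keys + 1 and the chosen fuel ((boxes.flatMap id).length + 2) never runs out.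
def unlockBoxesFuel (boxes : List (List Int)) : Nat → PySem.Dict Int Bool → Int → PySem.Dict Int Bool
  | 0, ob, _ => ob
  | n+1, ob, idx =>
    if PySem.Dict.getD ob idx false = true then
      match PySem.List.pyGet? boxes idx with
      | none => ob        -- Python: boxes[index] raises IndexError (excluded by Pre_)
      | some keys =>
        keys.foldl (fun ob key =>
          let is_opened := PySem.Dict.getD ob key false
          if key < idx && !is_opened then
            unlockBoxesFuel boxes n (PySem.Dict.insert ob key true) key
          else if !is_opened then PySem.Dict.insert ob key true
          else ob) ob
    else ob

def unlockBoxes (boxes : List (List Int)) (open_boxes : List (Int × Bool)) (index : Int) : List (Int × Bool) :=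
  (unlockBoxesFuel boxes ((boxes.flatMap id).length + 2) (PySem.Dict.mk open_boxes) index).items

-- ===== PORT B =====
-- all keys contained in any box (boxes flattened)
def pvAllKeys (boxes : List (List Int)) : List Int := boxes.flatMap id

-- number of listed keys not currently open (part of run's termination measure)
def pvClosed (boxes : List (List Int)) (ob : PySem.Dict Int Bool) : Nat :=
  ((pvAllKeys boxes).filter (fun k => !PySem.Dict.getD ob k false)).length

-- number of stack entries whose key is not a listed key (part of run's termination measure)
def pvStray (boxes : List (List Int)) (stack : List (Int × Int)) : Nat :=
  (stack.filter (fun p => !decide (p.2 ∈ pvAllKeys boxes))).length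

-- generic: a filter by a pointwise-smaller predicate is no longer (used by termination)
theorem pvFilter_le {α : Type} (l : List α) (p q : α → Bool) (h : ∀ x, q x = true → p x = true) :
    (l.filter q).length ≤ (l.filter p).length := by
  induction l with
  | nil => simp
  | cons a l ih =>
    by_cases hq : q a = true
    · simp [hq, h a hq]; omega
    · simp only [List.filter_cons, Bool.not_eq_true] at *
      rcases hp : p a <;> simp [hq] <;> omega

-- generic: a filter by a pointwise-smaller predicate that loses a member is strictly shorter
theorem pvFilter_lt {α : Type} (l : List α) (p q : α → Bool) (h : ∀ x, q x = true → p x = true)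
    (k : α) (hk : k ∈ l) (hp : p k = true) (hq : q k = false) :
    (l.filter q).length < (l.filter p).length := by
  induction l with
  | nil => simp at hk
  | cons a l ih =>
    rcases List.mem_cons.mp hk with rfl | hk'
    · have h1 := pvFilter_le l p q h
      simp [hp, hq]; omega
    · by_cases hqa : q a = true
      · simp [hqa, h a hqa]; exact ih hk'
      · simp only [Bool.not_eq_true] at hqa
        rcases hpa : p a <;> simp [hpa, hqa]
        · exact ih hk'
        · have := ih hk'; omega

theorem pvClosed_insert_imp (ob : PySem.Dict Int Bool) (k x : Int)
    (hx : (!PySem.Dict.getD (PySem.Dict.insert ob k true) x false) = true) :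
    (!PySem.Dict.getD ob x false) = true := by
  rw [PySem.Dict.getD_insert] at hx
  by_cases hxk : x = k <;> simp_all

theorem pvClosed_insert_lt (boxes : List (List Int)) (ob : PySem.Dict Int Bool) (k : Int)
    (hk : k ∈ pvAllKeys boxes) (h : PySem.Dict.getD ob k false = false) :
    pvClosed boxes (PySem.Dict.insert ob k true) < pvClosed boxes ob := by
  exact pvFilter_lt _ _ _ (fun x hx => pvClosed_insert_imp ob k x hx) k hk
    (by simp [h]) (by simp [PySem.Dict.getD_insert_self])

theorem pvClosed_insert_not_mem (boxes : List (List Int)) (ob : PySem.Dict Int Bool) (k : Int)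
    (hk : k ∉ pvAllKeys boxes) :
    pvClosed boxes (PySem.Dict.insert ob k true) = pvClosed boxes ob := by
  unfold pvClosed
  rw [List.filter_congr]
  intro x hx
  rw [PySem.Dict.getD_insert, if_neg]
  rintro rfl; exact hk hx

theorem pvMem_allKeys_of_pyGet? (boxes : List (List Int)) (i : Int) (l : List Int) (k : Int)
    (hg : PySem.List.pyGet? boxes i = some l) (hk : k ∈ l) : k ∈ pvAllKeys boxes := by
  unfold pvAllKeys
  exact List.mem_flatMap.mpr ⟨l, PySem.List.mem_of_pyGet?_eq_some boxes hg, hk⟩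

-- the iterative DFS loop of Source B: the head of `stack` is the top (next (parent, key) pair)
def unlockBoxesRun (boxes : List (List Int)) (ob : PySem.Dict Int Bool) (stack : List (Int × Int)) : PySem.Dict Int Bool :=
  match stack with
  | [] => ob
  | (parent, key) :: rest =>
    if hop : PySem.Dict.getD ob key false = true then
      unlockBoxesRun boxes ob rest
    else
      if key < parent then
        match hg : PySem.List.pyGet? boxes key with
        | none => unlockBoxesRun boxes (PySem.Dict.insert ob key true) rest
          -- Python: boxes[key] raises IndexError (excluded by Pre_)
        | some children =>
          unlockBoxesRun boxes (PySem.Dict.insert ob key true)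
            (children.map (fun k => (key, k)) ++ rest)
      else unlockBoxesRun boxes (PySem.Dict.insert ob key true) rest
termination_by (pvClosed boxes ob, pvStray boxes stack, stack.length)
decreasing_by
  · by_cases hk : key ∈ pvAllKeys boxes
    · apply Prod.Lex.right
      apply Prod.Lex.right' <;> simp [pvStray, hk]
    · apply Prod.Lex.right
      apply Prod.Lex.left
      simp [pvStray, hk]
  · by_cases hk : key ∈ pvAllKeys boxes
    · exact Prod.Lex.left _ _ (pvClosed_insert_lt _ _ _ hk (by simpa using hop))
    · rw [pvClosed_insert_not_mem _ _ _ hk]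
      apply Prod.Lex.right
      apply Prod.Lex.left
      simp [pvStray, hk]
  · by_cases hk : key ∈ pvAllKeys boxes
    · exact Prod.Lex.left _ _ (pvClosed_insert_lt _ _ _ hk (by simpa using hop))
    · rw [pvClosed_insert_not_mem _ _ _ hk]
      apply Prod.Lex.right
      apply Prod.Lex.left
      have hch : ∀ p ∈ children.map (fun k => (key, k)), ¬ (!decide (p.2 ∈ pvAllKeys boxes)) = true := by
        intro p hp
        simp only [List.mem_map] at hp
        obtain ⟨c, hc, rfl⟩ := hp
        simp [pvMem_allKeys_of_pyGet? boxes key children c hg hc]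
      simp [pvStray, List.filter_append, hk, List.filter_eq_nil_iff.mpr hch]
  · by_cases hk : key ∈ pvAllKeys boxes
    · exact Prod.Lex.left _ _ (pvClosed_insert_lt _ _ _ hk (by simpa using hop))
    · rw [pvClosed_insert_not_mem _ _ _ hk]
      apply Prod.Lex.right
      apply Prod.Lex.left
      simp [pvStray, hk]

def unlockBoxes_alt (boxes : List (List Int)) (open_boxes : List (Int × Bool)) (index : Int) : List (Int × Bool) :=
  if PySem.Dict.getD (PySem.Dict.mk open_boxes) index false = true then
    match PySem.List.pyGet? boxes index with
    | none => (PySem.Dict.mk open_boxes).items  -- Python: boxes[index] raises IndexError (excluded by Pre_)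
    | some keys =>
      (unlockBoxesRun boxes (PySem.Dict.mk open_boxes) (keys.map (fun k => (index, k)))).items
  else (PySem.Dict.mk open_boxes).items

-- ===== PRECONDITION & SPEC =====
-- A raises IndexError exactly when the DFS descends into a key below -len(boxes) (keys ≥
-- len(boxes) are only marked, never descended into, because a descended key is < its parent
-- index, which is always a valid index < len).  Pre_ therefore requires, when the start box
-- is open, a valid start index and every listed key to be ≥ -len(boxes) or initially open;
-- this is conservative only in that it also excludes such too-negative closed keys sitting
-- in boxes the DFS never visits (visitation is order-dependent, not closed-form); A returns
-- normally there and B agrees (see claim.json cites).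
def Pre_unlockBoxes (boxes : List (List Int)) (open_boxes : List (Int × Bool)) (index : Int) : Prop :=
  PySem.Dict.getD (PySem.Dict.mk open_boxes) index false = true →
    (PySem.Raise.InRange boxes.length index ∧
     ∀ b ∈ boxes, ∀ k ∈ b,
       -(boxes.length : Int) ≤ k ∨ PySem.Dict.getD (PySem.Dict.mk open_boxes) k false = true)
instance (boxes : List (List Int)) (open_boxes : List (Int × Bool)) (index : Int) : Decidable (Pre_unlockBoxes boxes open_boxes index) := by unfold Pre_unlockBoxes; infer_instance

def pvWitness_unlockBoxes : List (List Int) × (List (Int × Bool)) × Int := ([[1], [0]], [(0, true)], 0)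

def Spec_unlockBoxes (boxes : List (List Int)) (open_boxes : List (Int × Bool)) (index : Int) (out : List (Int × Bool)) : Prop := out = unlockBoxes_alt boxes open_boxes index
instance (boxes : List (List Int)) (open_boxes : List (Int × Bool)) (index : Int) (out : List (Int × Bool)) : Decidable (Spec_unlockBoxes boxes open_boxes index out) := by unfold Spec_unlockBoxes; infer_instance

-- ===== CLAIM (what is proved, stated in full; the proofs are below) =====
def Claim_equal_unlockBoxes : Prop := ∀ (boxes : List (List Int)) (open_boxes : List (Int × Bool)) (index : Int), Dom_unlockBoxes boxes open_boxes index → Pre_unlockBoxes boxes open_boxes index → Spec_unlockBoxes boxes open_boxes index (unlockBoxes boxes open_boxes index)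

-- ===== LEMMAS AND PROOFS =====

theorem pvClosed_insert_le (boxes : List (List Int)) (ob : PySem.Dict Int Bool) (k : Int) :
    pvClosed boxes (PySem.Dict.insert ob k true) ≤ pvClosed boxes ob :=
  pvFilter_le _ _ _ (fun x hx => pvClosed_insert_imp ob k x hx)

-- the loop body of A's `for key in boxes[index]`, at fuel n for the recursive call
def pvStepA (boxes : List (List Int)) (n : Nat) (idx : Int) (ob : PySem.Dict Int Bool) (key : Int) : PySem.Dict Int Bool :=
  let is_opened := PySem.Dict.getD ob key false
  if key < idx && !is_opened then
    unlockBoxesFuel boxes n (PySem.Dict.insert ob key true) key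
  else if !is_opened then PySem.Dict.insert ob key true
  else ob

theorem pvFuel_succ (boxes : List (List Int)) (n : Nat) (ob : PySem.Dict Int Bool) (idx : Int) :
    unlockBoxesFuel boxes (n+1) ob idx =
      if PySem.Dict.getD ob idx false = true then
        match PySem.List.pyGet? boxes idx with
        | none => ob
        | some keys => keys.foldl (pvStepA boxes n idx) ob
      else ob := rfl

-- A's recursion never closes an open key
theorem pvFuel_opened_mono (boxes : List (List Int)) :
    ∀ (n : Nat) (idx : Int) (ob : PySem.Dict Int Bool) (j : Int),
      PySem.Dict.getD ob j false = true →
      PySem.Dict.getD (unlockBoxesFuel boxes n ob idx) j false = true := by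
  intro n
  induction n with
  | zero => intro idx ob j hj; simpa [unlockBoxesFuel] using hj
  | succ n IH =>
    intro idx ob j hj
    have hstep : ∀ (idx key : Int) (ob : PySem.Dict Int Bool),
        PySem.Dict.getD ob j false = true →
        PySem.Dict.getD (pvStepA boxes n idx ob key) j false = true := by
      intro idx key ob hj
      simp only [pvStepA]
      split_ifs with h1 h2
      · apply IH
        rw [PySem.Dict.getD_insert]
        split <;> simp [hj]
      · rw [PySem.Dict.getD_insert]
        split <;> simp [hj]
      · exact hj
    have hfold : ∀ (keys : List Int) (idx : Int) (ob : PySem.Dict Int Bool),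
        PySem.Dict.getD ob j false = true →
        PySem.Dict.getD (keys.foldl (pvStepA boxes n idx) ob) j false = true := by
      intro keys
      induction keys with
      | nil => intro idx ob hj; simpa using hj
      | cons k ks IHk =>
        intro idx ob hj
        rw [List.foldl_cons]
        exact IHk idx _ (hstep idx k ob hj)
    rw [pvFuel_succ]
    split
    · split
      · exact hj
      · exact hfold _ idx ob hj
    · exact hj

theorem pvClosed_fuel_le (boxes : List (List Int)) (n : Nat) (ob : PySem.Dict Int Bool) (idx : Int) :
    pvClosed boxes (unlockBoxesFuel boxes n ob idx) ≤ pvClosed boxes ob := by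
  apply pvFilter_le
  intro x hx
  simp only [Bool.not_eq_true'] at hx ⊢
  by_contra hcon
  simp only [Bool.not_eq_false] at hcon
  have := pvFuel_opened_mono boxes n idx ob x hcon
  simp [this] at hx

-- the simulation: running B's stack loop on one frame's worth of pending keys computes
-- exactly A's fold over those keys, then continues with the rest of the stack
theorem pvSim (boxes : List (List Int)) :
    ∀ (N : Nat) (keys : List Int) (idx : Int) (ob : PySem.Dict Int Bool) (rest : List (Int × Int)),
      (∀ k ∈ keys, k ∈ pvAllKeys boxes) → pvClosed boxes ob < N →
      unlockBoxesRun boxes ob (keys.map (fun k => (idx, k)) ++ rest) =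
      unlockBoxesRun boxes (keys.foldl (pvStepA boxes N idx) ob) rest := by
  intro N
  induction N using Nat.strong_induction_on with
  | _ N IHN =>
    intro keys idx ob rest hk hN
    induction keys generalizing ob with
    | nil => simp
    | cons k ks IHk =>
      have hkmem : k ∈ pvAllKeys boxes := hk k (List.mem_cons_self ..)
      have hks : ∀ x ∈ ks, x ∈ pvAllKeys boxes := fun x hx => hk x (List.mem_cons_of_mem _ hx)
      rw [List.map_cons, List.cons_append, List.foldl_cons, unlockBoxesRun]
      by_cases hop : PySem.Dict.getD ob k false = true
      · rw [dif_pos hop]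
        have hstep : pvStepA boxes N idx ob k = ob := by
          simp only [pvStepA]; simp [hop]
        rw [hstep]
        exact IHk ob hks hN
      · rw [dif_neg hop]
        have hopf : PySem.Dict.getD ob k false = false := by simpa using hop
        by_cases hlt : k < idx
        · rw [if_pos hlt]
          -- descend: A recurses at fuel N; N = M+1 since pvClosed < N
          obtain ⟨M, rfl⟩ : ∃ M, N = M + 1 := ⟨N - 1, by omega⟩
          have hstep : pvStepA boxes (M+1) idx ob k =
              unlockBoxesFuel boxes (M+1) (PySem.Dict.insert ob k true) k := by
            simp only [pvStepA]; simp [hopf, hlt]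
          have hopened : PySem.Dict.getD (PySem.Dict.insert ob k true) k false = true := by
            simp [PySem.Dict.getD_insert_self]
          have hclosed' : pvClosed boxes (PySem.Dict.insert ob k true) < pvClosed boxes ob :=
            pvClosed_insert_lt boxes ob k hkmem hopf
          split
          · -- boxes[k] out of range: A's recursive call is the excluded-IndexError arm
            rename_i hg
            have hf : unlockBoxesFuel boxes (M+1) (PySem.Dict.insert ob k true) k =
                PySem.Dict.insert ob k true := by
              rw [pvFuel_succ, if_pos hopened, hg]
            rw [hstep, hf]
            exact IHk _ hks (by omega)
          · rename_i children hg
            have hf : unlockBoxesFuel boxes (M+1) (PySem.Dict.insert ob k true) k =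
                children.foldl (pvStepA boxes M k) (PySem.Dict.insert ob k true) := by
              rw [pvFuel_succ, if_pos hopened, hg]
            have hch : ∀ x ∈ children, x ∈ pvAllKeys boxes :=
              fun x hx => pvMem_allKeys_of_pyGet? boxes k children x hg hx
            have hrec := IHN M (by omega) children k (PySem.Dict.insert ob k true)
              (ks.map (fun k => (idx, k)) ++ rest) hch (by omega)
            rw [hrec, hstep, hf]
            apply IHk _ hks
            calc pvClosed boxes (children.foldl (pvStepA boxes M k) (PySem.Dict.insert ob k true))
                = pvClosed boxes (unlockBoxesFuel boxes (M+1) (PySem.Dict.insert ob k true) k) := by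
                  rw [hf]
              _ ≤ pvClosed boxes (PySem.Dict.insert ob k true) := pvClosed_fuel_le ..
              _ < _ := by omega
        · rw [if_neg hlt]
          have hstep : pvStepA boxes N idx ob k = PySem.Dict.insert ob k true := by
            simp only [pvStepA]; simp [hopf, hlt]
          rw [hstep]
          exact IHk _ hks (by
            have := pvClosed_insert_le boxes ob k; omega)

theorem pvClosed_le_len (boxes : List (List Int)) (ob : PySem.Dict Int Bool) :
    pvClosed boxes ob ≤ (boxes.flatMap id).length := by
  unfold pvClosed pvAllKeys
  apply List.length_filter_le

-- ===== VERDICT (by name: the statement is the Claim_ definition above) =====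
theorem unlockBoxes_spec : Claim_equal_unlockBoxes := by
  intro boxes open_boxes index _ _
  unfold Spec_unlockBoxes unlockBoxes unlockBoxes_alt
  have h2 : (boxes.flatMap id).length + 2 = ((boxes.flatMap id).length + 1) + 1 := rfl
  rw [h2, pvFuel_succ]
  by_cases hop : PySem.Dict.getD (PySem.Dict.mk open_boxes) index false = true
  · rw [if_pos hop, if_pos hop]
    cases hg : PySem.List.pyGet? boxes index with
    | none => rfl
    | some keys =>
      have hk : ∀ x ∈ keys, x ∈ pvAllKeys boxes :=
        fun x hx => pvMem_allKeys_of_pyGet? boxes index keys x hg hx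
      have hsim := pvSim boxes ((boxes.flatMap id).length + 1) keys index
        (PySem.Dict.mk open_boxes) [] hk
        (by have := pvClosed_le_len boxes (PySem.Dict.mk open_boxes); omega)
      simp only [List.append_nil] at hsim
      show (keys.foldl (pvStepA boxes ((boxes.flatMap id).length + 1) index)
          (PySem.Dict.mk open_boxes)).items =
        (unlockBoxesRun boxes (PySem.Dict.mk open_boxes)
          (keys.map (fun k => (index, k)))).items
      rw [hsim, unlockBoxesRun]
  · rw [if_neg hop, if_neg hop]
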